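-- pv_equiv track=rewrite | github.com/luisdi97/GIS_fork | shape.py | set_Label_Tx
-- ===== SOURCE A (Python) =====
-- def set_Label_Tx(LibType: str) -> str:
--     """Change name of labels.
--
--     It replaces the original labels (values's name of
--     attributes comming from Neplan) in LibraryType of
--     transformers, for common notation used in the manual of
--     `QGIS2OPENDSS` plug-in.
--     _PRIMCONN
--     primconn = {
--         "Estrella": "Y",
--         "Delta":, "D",
--         "OpenWye":, "OY",
--         "LineGound": "LG"
--     }
--     _SECCONN
--     secconn = {
--         "SplitPhase": "SP",
--         "Fase_Partida": "4D",
--         "OpenDelta": "OD"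
--     }
--
--     Note: _SECCONN of 4D means delta of four-wires.
--
--     """
--     # Library Type Modified
--     newTxLibType = LibType
--     # NOMVOLT
--     nomvolt = {
--         ".240": "0.24",
--         ".208": "0.208",
--         ".480": "0.48"
--     }
--
--     for (k, v) in nomvolt.items():
--         newTxLibType = newTxLibType.replace(k, v)
--
--     # Connection at any side
--     conn = {
--         "Estrella": "Y",
--         "Delta": "D",
--         "Fase_Partida": "4D"
--     }
--
--     for (k, v) in conn.items():
--         newTxLibType = newTxLibType.replace(k, v)
--
--     return newTxLibType
-- ===== SOURCE B (Python) =====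
-- _TABLE = {
--     ".240": "0.24",
--     ".208": "0.208",
--     ".480": "0.48",
--     "Estrella": "Y",
--     "Delta": "D",
--     "Fase_Partida": "4D",
-- }
--
--
-- def set_Label_Tx(LibType: str) -> str:
--     """Single left-to-right pass: at each position substitute the first
--     table key that starts there, otherwise copy the character."""
--     out = []
--     i = 0
--     n = len(LibType)
--     while i < n:
--         for k, v in _TABLE.items():
--             if LibType.startswith(k, i):
--                 out.append(v)
--                 i += len(k)
--                 break
--         else:
--             out.append(LibType[i])
--             i += 1
--     return "".join(out)
-- ===== Notes on version B (the rewrite author's own statement) =====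
-- stated objective: alternative
-- what changed: Replaces the six sequential whole-string .replace passes by one left-to-right scan with a single merged key->value table, substituting the matching key at each position (string traversed once instead of six times).
-- intended difference: On strings containing ".48.240" or ".48.208", A's earlier replacement emits a leading '0' that joins the preceding ".48" into a new ".480" which the later pass then also rewrites (A(".48.240") = "0.48.24"), while B replaces only tokens present in the original string (B(".48.240") = ".480.24"), which is the intended label substitution. — e.g. on set_Label_Tx(".48.240"): A returns "0.48.24", B returns ".480.24"
import Mathlib
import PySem

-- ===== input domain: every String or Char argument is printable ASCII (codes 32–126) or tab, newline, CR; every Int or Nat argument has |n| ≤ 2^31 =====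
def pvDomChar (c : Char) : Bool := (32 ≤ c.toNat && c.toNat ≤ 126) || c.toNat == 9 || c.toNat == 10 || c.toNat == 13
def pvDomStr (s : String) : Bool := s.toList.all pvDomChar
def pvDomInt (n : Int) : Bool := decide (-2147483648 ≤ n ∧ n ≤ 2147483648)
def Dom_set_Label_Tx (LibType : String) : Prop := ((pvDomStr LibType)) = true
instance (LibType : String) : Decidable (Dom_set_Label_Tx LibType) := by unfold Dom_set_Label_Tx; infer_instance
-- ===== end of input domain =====

-- B replaces A's six sequential whole-string .replace passes by ONE left-to-right scan
-- with a single merged key→value table (objective: alternative, single-traversal algorithm).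

-- ===== PORT A =====
-- literal transliteration: two dict literals, each iterated in insertion order,
-- each item applied as a whole-string str.replace
def set_Label_Tx (LibType : String) : String :=
  let nomvolt : List (String × String) := [(".240", "0.24"), (".208", "0.208"), (".480", "0.48")]
  let newTx1 := nomvolt.foldl (fun acc kv => PySem.Str.replace acc kv.1 kv.2) LibType
  let conn : List (String × String) := [("Estrella", "Y"), ("Delta", "D"), ("Fase_Partida", "4D")]
  conn.foldl (fun acc kv => PySem.Str.replace acc kv.1 kv.2) newTx1

-- ===== PORT B =====
-- B's merged table, in Source B's dict order
def pvTable : List (List Char × List Char) :=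
  [ (".240".toList, "0.24".toList), (".208".toList, "0.208".toList), (".480".toList, "0.48".toList),
    ("Estrella".toList, "Y".toList), ("Delta".toList, "D".toList), ("Fase_Partida".toList, "4D".toList) ]

-- Source B's inner `for k, v in TABLE.items(): if startswith … break / else` at one position
def pvTryKeys : List (List Char × List Char) → List Char → Option (List Char × List Char)
  | [], _ => none
  | (k, v) :: ks, s => if k.isPrefixOf s then some (v, s.drop (k.length.max 1)) else pvTryKeys ks s
-- (`k.length.max 1` only guards termination for an empty key; every key of pvTable is nonempty)

theorem pvTryKeys_some_length (ks : List (List Char × List Char)) (c : Char) (cs : List Char)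
    (v r : List Char) (h : pvTryKeys ks (c :: cs) = some (v, r)) : r.length < (c :: cs).length := by
  induction ks with
  | nil => simp [pvTryKeys] at h
  | cons p ks ih =>
    obtain ⟨k, w⟩ := p
    by_cases hp : k.isPrefixOf (c :: cs)
    · simp only [pvTryKeys, hp, if_pos] at h
      cases h
      have hmax : 1 ≤ k.length.max 1 := Nat.le_max_right _ _
      simp only [List.length_drop, List.length_cons]
      omega
    · simp only [pvTryKeys, hp] at h
      simp at h
      exact ih h

-- Source B's outer while loop: one pass over the string
def pvScan (ks : List (List Char × List Char)) : List Char → List Char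
  | [] => []
  | c :: cs =>
    match h : pvTryKeys ks (c :: cs) with
    | some (v, r) => v ++ pvScan ks r
    | none => c :: pvScan ks cs
termination_by s => s.length
decreasing_by
  · exact pvTryKeys_some_length ks c cs v r h
  · simp

def set_Label_Tx_alt (LibType : String) : String :=
  String.ofList (pvScan pvTable LibType.toList)

-- ===== PRECONDITION & SPEC =====
-- On strings containing ".48.240" or ".48.208", A's earlier replacement emits a leading '0'
-- that merges with the preceding ".48" into a new ".480" which a later pass rewrites again
-- (A ".48.240" = "0.48.24"); B substitutes only tokens present in the original string
-- (B ".48.240" = ".480.24"), which is the intended label substitution.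
def D_set_Label_Tx (LibType : String) : Prop :=
  PySem.Str.isIn ".48.240" LibType = true ∨ PySem.Str.isIn ".48.208" LibType = true
instance (LibType : String) : Decidable (D_set_Label_Tx LibType) := by
  unfold D_set_Label_Tx; infer_instance

def Spec_set_Label_Tx (LibType : String) (out : String) : Prop :=
  ¬ D_set_Label_Tx LibType → out = set_Label_Tx_alt LibType
instance (LibType : String) (out : String) : Decidable (Spec_set_Label_Tx LibType out) := by
  unfold Spec_set_Label_Tx; infer_instance

def pvDiffWitness_set_Label_Tx : String := ".48.240"
def pvDiffWitnessOut_set_Label_Tx : String × String := ("0.48.24", ".480.24")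

-- ===== CLAIM (what is proved, stated in full; the proofs are below) =====
def Claim_unchanged_set_Label_Tx : Prop :=
  ∀ (LibType : String), Dom_set_Label_Tx LibType → Spec_set_Label_Tx LibType (set_Label_Tx LibType)
def Claim_changed_set_Label_Tx : Prop :=
  Dom_set_Label_Tx (pvDiffWitness_set_Label_Tx) ∧ D_set_Label_Tx (pvDiffWitness_set_Label_Tx) ∧
  set_Label_Tx (pvDiffWitness_set_Label_Tx) = pvDiffWitnessOut_set_Label_Tx.1 ∧
  set_Label_Tx_alt (pvDiffWitness_set_Label_Tx) = pvDiffWitnessOut_set_Label_Tx.2 ∧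
  pvDiffWitnessOut_set_Label_Tx.1 ≠ pvDiffWitnessOut_set_Label_Tx.2
def Claim_exact_set_Label_Tx : Prop :=
  ∀ (LibType : String), Dom_set_Label_Tx LibType → D_set_Label_Tx LibType →
    set_Label_Tx LibType ≠ set_Label_Tx_alt LibType


-- ===== LEMMAS AND PROOFS =====

-- ---- generic prefix/suffix toolkit ----

/-- `p` and `q` disagree before either exhausts: neither is a prefix of the other. -/
abbrev pvMism (p q : List Char) : Prop := ¬ p <+: q ∧ ¬ q <+: p

/-- `k` matches at no position of `w`, regardless of what follows `w`. -/
abbrev pvPass (k w : List Char) : Prop := ∀ t ∈ w.tails, t ≠ [] → pvMism k t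

theorem pvTwoPrefix {p v X : List Char} (h : p <+: v ++ X) : p <+: v ∨ v <+: p := by
  rcases le_total p.length v.length with hl | hl
  · exact Or.inl (List.prefix_of_prefix_length_le h (List.prefix_append v X) hl)
  · exact Or.inr (List.prefix_of_prefix_length_le (List.prefix_append v X) h hl)

theorem pvNotPrefixAppend {p v : List Char} (h : pvMism p v) (X : List Char) :
    ¬ p <+: v ++ X := fun hp => (pvTwoPrefix hp).elim h.1 h.2

theorem pvPass_tail {k : List Char} {a : Char} {w : List Char} (h : pvPass k (a :: w)) :
    pvPass k w := fun t ht hne =>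
  h t ((List.mem_tails ..).mpr (((List.mem_tails ..).mp ht).trans (List.suffix_cons a w))) hne

-- ---- char-level leftmost non-rescanning replace (the semantics of str.replace) ----

def pvRepl (k v : List Char) : List Char → List Char
  | [] => []
  | c :: cs =>
    if k.isPrefixOf (c :: cs) then v ++ pvRepl k v ((c :: cs).drop (k.length.max 1))
    else c :: pvRepl k v cs
termination_by s => s.length
decreasing_by
  · have : 1 ≤ k.length.max 1 := Nat.le_max_right _ _
    simp only [List.length_drop, List.length_cons]
    omega
  · simp

theorem pvRepl_nil (k v : List Char) : pvRepl k v [] = [] := by simp [pvRepl]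

theorem pvRepl_hit {k : List Char} (v : List Char) (hk : k ≠ []) (X : List Char) :
    pvRepl k v (k ++ X) = v ++ pvRepl k v X := by
  cases k with
  | nil => exact absurd rfl hk
  | cons a k' =>
    have hp : (a :: k').isPrefixOf (a :: k' ++ X) = true :=
      List.isPrefixOf_iff_prefix.mpr ⟨X, by simp⟩
    rw [List.cons_append, pvRepl, if_pos (by simpa using hp)]
    have hmax : (a :: k').length.max 1 = (a :: k').length :=
      Nat.max_eq_left (by simp)
    rw [← List.cons_append, hmax, List.drop_left]

theorem pvRepl_miss {k : List Char} (v : List Char) {c : Char} {cs : List Char}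
    (h : ¬ k <+: (c :: cs)) : pvRepl k v (c :: cs) = c :: pvRepl k v cs := by
  have hb : ¬ (k.isPrefixOf (c :: cs) = true) := by
    simpa [List.isPrefixOf_iff_prefix] using h
  rw [pvRepl, if_neg hb]

theorem pvRepl_pass {k : List Char} (v : List Char) {w : List Char} (h : pvPass k w)
    (X : List Char) : pvRepl k v (w ++ X) = w ++ pvRepl k v X := by
  induction w with
  | nil => simp
  | cons a w' ih =>
    have hm : pvMism k (a :: w') :=
      h (a :: w') ((List.mem_tails ..).mpr List.suffix_rfl) (by simp)
    have hnp : ¬ k <+: a :: (w' ++ X) := by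
      rw [← List.cons_append]; exact pvNotPrefixAppend hm X
    rw [List.cons_append, pvRepl_miss _ hnp, ih (pvPass_tail h), List.cons_append]

-- ---- pvTryKeys / pvScan toolkit ----

theorem pvTryKeys_none_of {ks : List (List Char × List Char)} {s : List Char}
    (h : ∀ p ∈ ks, ¬ p.1 <+: s) : pvTryKeys ks s = none := by
  induction ks with
  | nil => rfl
  | cons p ks ih =>
    obtain ⟨k, w⟩ := p
    rw [pvTryKeys, if_neg]
    · exact ih fun q hq => h q (List.mem_cons_of_mem _ hq)
    · simpa [List.isPrefixOf_iff_prefix] using h (k, w) List.mem_cons_self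

theorem pvTryKeys_none_mem {ks : List (List Char × List Char)} {s : List Char}
    (h : pvTryKeys ks s = none) : ∀ p ∈ ks, ¬ p.1 <+: s := by
  induction ks with
  | nil => simp
  | cons p ks ih =>
    obtain ⟨k, w⟩ := p
    intro q hq
    by_cases hp : k.isPrefixOf s
    · rw [pvTryKeys, if_pos hp] at h; cases h
    · rw [pvTryKeys, if_neg hp] at h
      rcases List.mem_cons.mp hq with rfl | hq'
      · simpa [List.isPrefixOf_iff_prefix] using hp
      · exact ih h q hq'

theorem pvTryKeys_hit (ks₁ : List (List Char × List Char)) {k : List Char} (v : List Char)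
    (ks₂ : List (List Char × List Char)) (X : List Char)
    (h1 : ∀ p ∈ ks₁, pvMism p.1 k) (hk : k ≠ []) :
    pvTryKeys (ks₁ ++ (k, v) :: ks₂) (k ++ X) = some (v, X) := by
  induction ks₁ with
  | nil =>
    rw [List.nil_append, pvTryKeys, if_pos]
    · have hmax : k.length.max 1 = k.length :=
        Nat.max_eq_left (by have := List.length_pos_iff.mpr hk; omega)
      rw [hmax, List.drop_left]
    · exact List.isPrefixOf_iff_prefix.mpr ⟨X, rfl⟩
  | cons p ks₁ ih =>
    obtain ⟨q, w⟩ := p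
    rw [List.cons_append, pvTryKeys, if_neg]
    · exact ih fun r hr => h1 r (List.mem_cons_of_mem _ hr)
    · simpa [List.isPrefixOf_iff_prefix] using
        pvNotPrefixAppend (h1 (q, w) List.mem_cons_self) X

theorem pvTryKeys_some_spec {ks : List (List Char × List Char)} {s v r : List Char}
    (hkeys : ∀ p ∈ ks, p.1 ≠ []) (h : pvTryKeys ks s = some (v, r)) :
    ∃ ks₁ k ks₂, ks = ks₁ ++ (k, v) :: ks₂ ∧ (∀ p ∈ ks₁, ¬ p.1 <+: s) ∧ k ≠ [] ∧ s = k ++ r := by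
  induction ks with
  | nil => cases h
  | cons p ks ih =>
    obtain ⟨k, w⟩ := p
    by_cases hp : k.isPrefixOf s
    · rw [pvTryKeys, if_pos hp] at h
      cases h
      have hk : k ≠ [] := hkeys (k, v) List.mem_cons_self
      have hmax : k.length.max 1 = k.length :=
        Nat.max_eq_left (by have := List.length_pos_iff.mpr hk; omega)
      refine ⟨[], k, ks, by simp, by simp, hk, ?_⟩
      rw [hmax]
      exact (List.prefix_iff_eq_append.mp (List.isPrefixOf_iff_prefix.mp hp)).symm
    · rw [pvTryKeys, if_neg hp] at h
      obtain ⟨ks₁, kk, ks₂, h₁, h₂, h₃, h₄⟩ := ih (fun q hq => hkeys q (List.mem_cons_of_mem _ hq)) h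
      refine ⟨(k, w) :: ks₁, kk, ks₂, by rw [h₁, List.cons_append], ?_, h₃, h₄⟩
      intro q hq
      rcases List.mem_cons.mp hq with rfl | hq'
      · simpa [List.isPrefixOf_iff_prefix] using hp
      · exact h₂ q hq'

theorem pvScan_nil (ks : List (List Char × List Char)) : pvScan ks [] = [] := by
  simp [pvScan]

theorem pvScan_cons_some {ks : List (List Char × List Char)} {c : Char} {cs v r : List Char}
    (h : pvTryKeys ks (c :: cs) = some (v, r)) :
    pvScan ks (c :: cs) = v ++ pvScan ks r := by
  rw [pvScan]
  split
  · rename_i v' r' heq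
    rw [h] at heq
    cases heq
    rfl
  · rename_i heq
    rw [h] at heq
    cases heq

theorem pvScan_cons_none {ks : List (List Char × List Char)} {c : Char} {cs : List Char}
    (h : pvTryKeys ks (c :: cs) = none) :
    pvScan ks (c :: cs) = c :: pvScan ks cs := by
  rw [pvScan]
  split
  · rename_i v' r' heq
    rw [h] at heq
    cases heq
  · rfl

theorem pvScan_id (s : List Char) : pvScan [] s = s := by
  induction s with
  | nil => exact pvScan_nil []
  | cons c cs ih => rw [pvScan_cons_none rfl, ih]

theorem pvScan_pass {ks : List (List Char × List Char)} {w : List Char}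
    (h : ∀ p ∈ ks, pvPass p.1 w) (X : List Char) :
    pvScan ks (w ++ X) = w ++ pvScan ks X := by
  induction w with
  | nil => simp
  | cons a w' ih =>
    have hnone : pvTryKeys ks (a :: (w' ++ X)) = none :=
      pvTryKeys_none_of fun p hp =>
        pvNotPrefixAppend (h p hp (a :: w') ((List.mem_tails ..).mpr List.suffix_rfl) (by simp)) X
    rw [List.cons_append, pvScan_cons_none hnone, ih fun p hp => pvPass_tail (h p hp),
      List.cons_append]

theorem pvScan_hit {ks ks₁ ks₂ : List (List Char × List Char)} {k : List Char} (v : List Char)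
    (htbl : ks = ks₁ ++ (k, v) :: ks₂) (h1 : ∀ p ∈ ks₁, pvMism p.1 k) (hk : k ≠ [])
    (X : List Char) : pvScan ks (k ++ X) = v ++ pvScan ks X := by
  cases k with
  | nil => exact absurd rfl hk
  | cons a k' =>
    rw [List.cons_append, pvScan_cons_some (by rw [htbl, ← List.cons_append]; exact pvTryKeys_hit ks₁ v ks₂ X h1 hk)]

-- ---- "a replacement cannot fabricate a key occurrence" lemmas ----

/-- If every nonempty tail of `p` disagrees with the replacement value `v`,
then `p` occurring at the front of a replaced string occurred at the front already. -/
theorem pvNC (k v : List Char) (hk : k ≠ []) :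
    ∀ p : List Char, (∀ t ∈ p.tails, t ≠ [] → pvMism t v) →
      ∀ w, p <+: pvRepl k v w → p <+: w := by
  intro p
  induction p with
  | nil => exact fun _ w _ => List.nil_prefix
  | cons a p' ih =>
    intro hc w hp
    match w with
    | [] =>
      rw [pvRepl_nil] at hp
      exact absurd (List.eq_nil_of_prefix_nil hp) (by simp)
    | c :: cs =>
      by_cases hkp : k <+: (c :: cs)
      · obtain ⟨X, hX⟩ := hkp
        rw [← hX, pvRepl_hit _ hk] at hp
        have hm : pvMism (a :: p') v :=
          hc (a :: p') ((List.mem_tails ..).mpr List.suffix_rfl) (by simp)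
        exact ((pvTwoPrefix hp).elim hm.1 hm.2).elim
      · rw [pvRepl_miss _ hkp, List.cons_prefix_cons] at hp
        refine List.cons_prefix_cons.mpr ⟨hp.1, ?_⟩
        refine ih (fun t ht hne => hc t ?_ hne) cs hp.2
        exact (List.mem_tails ..).mpr
          (((List.mem_tails ..).mp ht).trans (List.suffix_cons a p'))

/-- The one real fabrication pattern of stage 1 (".240"→"0.24"): a new ".480" can only
arise from an original ".48.240"; absent that, a "480" at the front survived from input. -/
theorem pvNC480₁ (w : List Char)
    (hnf : ¬ (['.','4','8','.','2','4','0'] <+: ('.' :: w)))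
    (hp : ['4','8','0'] <+: pvRepl ['.','2','4','0'] ['0','.','2','4'] w) :
    ['4','8','0'] <+: w := by
  match w with
  | [] => rw [pvRepl_nil] at hp; exact absurd (List.eq_nil_of_prefix_nil hp) (by simp)
  | c :: cs =>
    by_cases h1 : ['.','2','4','0'] <+: (c :: cs)
    · obtain ⟨X, hX⟩ := h1
      rw [← hX, pvRepl_hit _ (by simp)] at hp
      simp [List.cons_prefix_cons] at hp
    · rw [pvRepl_miss _ h1, List.cons_prefix_cons] at hp
      obtain ⟨hc, hp⟩ := hp
      subst hc
      match cs with
      | [] => rw [pvRepl_nil] at hp; exact absurd (List.eq_nil_of_prefix_nil hp) (by simp)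
      | d :: ds =>
        by_cases h2 : ['.','2','4','0'] <+: (d :: ds)
        · obtain ⟨X, hX⟩ := h2
          rw [← hX, pvRepl_hit _ (by simp)] at hp
          simp [List.cons_prefix_cons] at hp
        · rw [pvRepl_miss _ h2, List.cons_prefix_cons] at hp
          obtain ⟨hd, hp⟩ := hp
          subst hd
          match ds with
          | [] => rw [pvRepl_nil] at hp; exact absurd (List.eq_nil_of_prefix_nil hp) (by simp)
          | e :: es =>
            by_cases h3 : ['.','2','4','0'] <+: (e :: es)
            · obtain ⟨X, hX⟩ := h3
              exact absurd ⟨X, by rw [← hX]; rfl⟩ hnf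
            · rw [pvRepl_miss _ h3, List.cons_prefix_cons] at hp
              obtain ⟨he, -⟩ := hp
              subst he
              exact ⟨es, rfl⟩

/-- Same for stage 2 (".208"→"0.208") and an original ".48.208". -/
theorem pvNC480₂ (w : List Char)
    (hnf : ¬ (['.','4','8','.','2','0','8'] <+: ('.' :: w)))
    (hp : ['4','8','0'] <+: pvRepl ['.','2','0','8'] ['0','.','2','0','8'] w) :
    ['4','8','0'] <+: w := by
  match w with
  | [] => rw [pvRepl_nil] at hp; exact absurd (List.eq_nil_of_prefix_nil hp) (by simp)
  | c :: cs =>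
    by_cases h1 : ['.','2','0','8'] <+: (c :: cs)
    · obtain ⟨X, hX⟩ := h1
      rw [← hX, pvRepl_hit _ (by simp)] at hp
      simp [List.cons_prefix_cons] at hp
    · rw [pvRepl_miss _ h1, List.cons_prefix_cons] at hp
      obtain ⟨hc, hp⟩ := hp
      subst hc
      match cs with
      | [] => rw [pvRepl_nil] at hp; exact absurd (List.eq_nil_of_prefix_nil hp) (by simp)
      | d :: ds =>
        by_cases h2 : ['.','2','0','8'] <+: (d :: ds)
        · obtain ⟨X, hX⟩ := h2
          rw [← hX, pvRepl_hit _ (by simp)] at hp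
          simp [List.cons_prefix_cons] at hp
        · rw [pvRepl_miss _ h2, List.cons_prefix_cons] at hp
          obtain ⟨hd, hp⟩ := hp
          subst hd
          match ds with
          | [] => rw [pvRepl_nil] at hp; exact absurd (List.eq_nil_of_prefix_nil hp) (by simp)
          | e :: es =>
            by_cases h3 : ['.','2','0','8'] <+: (e :: es)
            · obtain ⟨X, hX⟩ := h3
              exact absurd ⟨X, by rw [← hX]; rfl⟩ hnf
            · rw [pvRepl_miss _ h3, List.cons_prefix_cons] at hp
              obtain ⟨he, -⟩ := hp
              subst he
              exact ⟨es, rfl⟩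

/-- An infix of `v ++ X` whose every comparison with a tail of `v` fails is an infix of `X`. -/
theorem pvInfSplit (p : List Char) :
    ∀ v X : List Char, (∀ t ∈ v.tails, t ≠ [] → pvMism p t) → p <:+: v ++ X → p <:+: X := by
  intro v
  induction v with
  | nil => exact fun X _ h => by simpa using h
  | cons a v' ih =>
    intro X hc hinf
    rw [List.cons_append, List.infix_cons_iff] at hinf
    rcases hinf with hpre | hinf
    · rw [← List.cons_append] at hpre
      have hm : pvMism p (a :: v') :=
        hc (a :: v') ((List.mem_tails ..).mpr List.suffix_rfl) (by simp)
      exact ((pvTwoPrefix hpre).elim hm.1 hm.2).elim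
    · refine ih X (fun t ht hne => hc t ?_ hne) hinf
      exact (List.mem_tails ..).mpr
        (((List.mem_tails ..).mp ht).trans (List.suffix_cons a v'))

/-- Stage 1 cannot fabricate an occurrence of ".48.208". -/
theorem pvPres208 : ∀ n u, u.length ≤ n → ¬ (['.','4','8','.','2','0','8'] <:+: u) →
    ¬ (['.','4','8','.','2','0','8'] <:+: pvRepl ['.','2','4','0'] ['0','.','2','4'] u) := by
  intro n
  induction n with
  | zero =>
    intro u hu h
    rw [List.length_eq_zero_iff.mp (Nat.le_zero.mp hu), pvRepl_nil]
    simpa using h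
  | succ n ih =>
    intro u hu h
    match u with
    | [] => rw [pvRepl_nil]; simpa using h
    | c :: cs =>
      by_cases hkp : ['.','2','4','0'] <+: (c :: cs)
      · obtain ⟨X, hX⟩ := hkp
        rw [← hX, pvRepl_hit _ (by simp)]
        intro hinf
        have h2 := pvInfSplit _ _ _ (by decide) hinf
        have hlen : X.length ≤ n := by
          have h5 := congrArg List.length hX
          simp only [List.length_append, List.length_cons] at h5 hu
          simp at h5
          omega
        have hX' : ¬ (['.','4','8','.','2','0','8'] <:+: X) := fun hi =>
          h (by rw [← hX]; exact hi.trans (List.suffix_append _ X).isInfix)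
        exact ih X hlen hX' h2
      · rw [pvRepl_miss _ hkp]
        intro hinf
        rcases List.infix_cons_iff.mp hinf with hpre | hinf'
        · rcases List.cons_prefix_cons.mp hpre with ⟨hc, hpre'⟩
          have h48 := pvNC ['.','2','4','0'] ['0','.','2','4'] (by simp)
            ['4','8','.','2','0','8'] (by decide) cs hpre'
          exact h (List.IsPrefix.isInfix (List.cons_prefix_cons.mpr ⟨hc, h48⟩))
        · have hcs : ¬ (['.','4','8','.','2','0','8'] <:+: cs) := fun hi =>
            h (List.infix_cons_iff.mpr (Or.inr hi))
          exact ih cs (by simpa using Nat.lt_succ_iff.mp (by simpa using hu)) hcs hinf'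

-- ---- the per-stage equivalence: scanning after one replace pass = scanning with the key added ----

theorem pvLgen (k v : List Char) (tbl : List (List Char × List Char)) (P : List Char → Prop)
    (hk : k ≠ []) (hkeys : ∀ p ∈ tbl, p.1 ≠ [])
    (hpassv : ∀ p ∈ tbl, pvPass p.1 v)
    (hpassk : ∀ p ∈ tbl, pvPass k p.1)
    (hpw : List.Pairwise (fun p q => pvMism p.1 q.1) tbl)
    (hPsuf : ∀ u r, P u → r <:+ u → P r)
    (hNC : ∀ c cs, P (c :: cs) → ¬ k <+: (c :: cs) →
      ∀ p ∈ tbl, p.1 <+: c :: pvRepl k v cs → p.1 <+: c :: cs) :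
    ∀ n u, u.length ≤ n → P u →
      pvScan tbl (pvRepl k v u) = pvScan ((k, v) :: tbl) u := by
  intro n
  induction n with
  | zero =>
    intro u hu _
    rw [List.length_eq_zero_iff.mp (Nat.le_zero.mp hu), pvRepl_nil, pvScan_nil, pvScan_nil]
  | succ n ih =>
    intro u hu hP
    match u with
    | [] => rw [pvRepl_nil, pvScan_nil, pvScan_nil]
    | c :: cs =>
      simp only [List.length_cons] at hu
      by_cases hkp : k <+: (c :: cs)
      · obtain ⟨X, hX⟩ := hkp
        have hlenX : X.length ≤ n := by
          have h5 := congrArg List.length hX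
          simp only [List.length_append, List.length_cons] at h5
          have := List.length_pos_iff.mpr hk
          omega
        rw [← hX, pvRepl_hit _ hk, pvScan_pass hpassv,
          ih X hlenX (hPsuf (k ++ X) X (by rw [hX]; exact hP) (List.suffix_append k X)),
          pvScan_hit v (ks₁ := []) (ks₂ := tbl) (by simp) (by simp) hk]
      · cases htk : pvTryKeys tbl (c :: cs) with
        | none =>
          have hnone := pvTryKeys_none_mem htk
          have hL : pvTryKeys tbl (c :: pvRepl k v cs) = none :=
            pvTryKeys_none_of fun p hp hpre => hnone p hp (hNC c cs hP hkp p hp hpre)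
          have hR : pvTryKeys ((k, v) :: tbl) (c :: cs) = none := by
            rw [pvTryKeys, if_neg (by simpa [List.isPrefixOf_iff_prefix] using hkp)]
            exact htk
          rw [pvRepl_miss _ hkp, pvScan_cons_none hL,
            ih cs (by omega) (hPsuf _ _ hP (List.suffix_cons c cs)), pvScan_cons_none hR]
        | some pr =>
          obtain ⟨vv, r⟩ := pr
          obtain ⟨ks₁, kk, ks₂, htbl, hks₁, hkk, hs⟩ := pvTryKeys_some_spec hkeys htk
          have hmemkk : (kk, vv) ∈ tbl := by rw [htbl]; exact List.mem_append_right _ List.mem_cons_self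
          have hpasskk : pvPass k kk := hpassk (kk, vv) hmemkk
          have hm₁ : ∀ p ∈ ks₁, pvMism p.1 kk := by
            have hpw' : List.Pairwise (fun p q => pvMism p.1 q.1) (ks₁ ++ (kk, vv) :: ks₂) :=
              htbl ▸ hpw
            rw [List.pairwise_append] at hpw'
            exact fun p hp => hpw'.2.2 p hp (kk, vv) List.mem_cons_self
          have hmkkk : pvMism k kk :=
            hpasskk kk ((List.mem_tails ..).mpr List.suffix_rfl) hkk
          have hlenr : r.length ≤ n := by
            have h5 := congrArg List.length hs
            simp only [List.length_append, List.length_cons] at h5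
            have := List.length_pos_iff.mpr hkk
            omega
          have eIH := ih r hlenr (hPsuf _ _ hP (by rw [hs]; exact List.suffix_append _ _))
          rw [hs, pvRepl_pass _ hpasskk, pvScan_hit vv htbl hm₁ hkk,
            pvScan_hit vv (ks₁ := (k, v) :: ks₁) (ks₂ := ks₂) (by rw [htbl]; simp)
              (by intro p hp
                  rcases List.mem_cons.mp hp with rfl | hp'
                  · exact hmkkk
                  · exact hm₁ p hp') hkk, eIH]

-- ---- the six stages, instantiated ----

/-- Explicit char-level form of the merged table and its suffixes. -/
def pvE5 : List (List Char × List Char) :=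
  [(['F','a','s','e','_','P','a','r','t','i','d','a'], ['4','D'])]
def pvE4 : List (List Char × List Char) := (['D','e','l','t','a'], ['D']) :: pvE5
def pvE3 : List (List Char × List Char) := (['E','s','t','r','e','l','l','a'], ['Y']) :: pvE4
def pvE2 : List (List Char × List Char) := (['.','4','8','0'], ['0','.','4','8']) :: pvE3
def pvE1 : List (List Char × List Char) := (['.','2','0','8'], ['0','.','2','0','8']) :: pvE2
def pvE0 : List (List Char × List Char) := (['.','2','4','0'], ['0','.','2','4']) :: pvE1

theorem pvTable_eq : pvTable = pvE0 := by decide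

theorem pvNCcons {k v : List Char} (hk : k ≠ []) (d : Char) (p' : List Char)
    (hcond : ∀ t ∈ p'.tails, t ≠ [] → pvMism t v) {c : Char} {cs : List Char}
    (hpre : (d :: p') <+: c :: pvRepl k v cs) : (d :: p') <+: c :: cs := by
  rcases List.cons_prefix_cons.mp hpre with ⟨h1, h2⟩
  exact List.cons_prefix_cons.mpr ⟨h1, pvNC k v hk p' hcond cs h2⟩

theorem pvL1 (u : List Char)
    (h240 : ¬ (['.','4','8','.','2','4','0'] <:+: u))
    (h208 : ¬ (['.','4','8','.','2','0','8'] <:+: u)) :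
    pvScan pvE1 (pvRepl ['.','2','4','0'] ['0','.','2','4'] u) = pvScan pvE0 u := by
  refine pvLgen _ _ pvE1
    (fun s => ¬ (['.','4','8','.','2','4','0'] <:+: s) ∧ ¬ (['.','4','8','.','2','0','8'] <:+: s))
    (by simp) (by decide) (by decide) (by decide) (by decide)
    (fun a r ha hr => ⟨fun hi => ha.1 (hi.trans hr.isInfix), fun hi => ha.2 (hi.trans hr.isInfix)⟩)
    ?_ u.length u le_rfl ⟨h240, h208⟩
  intro c cs hP hkp p hp hpre
  fin_cases hp
  · exact pvNCcons (by simp) _ _ (by decide) hpre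
  · rcases List.cons_prefix_cons.mp hpre with ⟨hc, hrest⟩
    subst hc
    exact List.cons_prefix_cons.mpr ⟨rfl, pvNC480₁ cs (fun hq => hP.1 hq.isInfix) hrest⟩
  · exact pvNCcons (by simp) _ _ (by decide) hpre
  · exact pvNCcons (by simp) _ _ (by decide) hpre
  · exact pvNCcons (by simp) _ _ (by decide) hpre

theorem pvL2 (u : List Char) (h208 : ¬ (['.','4','8','.','2','0','8'] <:+: u)) :
    pvScan pvE2 (pvRepl ['.','2','0','8'] ['0','.','2','0','8'] u) = pvScan pvE1 u := by
  refine pvLgen _ _ pvE2 (fun s => ¬ (['.','4','8','.','2','0','8'] <:+: s))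
    (by simp) (by decide) (by decide) (by decide) (by decide)
    (fun a r ha hr hi => ha (hi.trans hr.isInfix))
    ?_ u.length u le_rfl h208
  intro c cs hP hkp p hp hpre
  fin_cases hp
  · rcases List.cons_prefix_cons.mp hpre with ⟨hc, hrest⟩
    subst hc
    exact List.cons_prefix_cons.mpr ⟨rfl, pvNC480₂ cs (fun hq => hP hq.isInfix) hrest⟩
  · exact pvNCcons (by simp) _ _ (by decide) hpre
  · exact pvNCcons (by simp) _ _ (by decide) hpre
  · exact pvNCcons (by simp) _ _ (by decide) hpre

theorem pvL3 (u : List Char) :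
    pvScan pvE3 (pvRepl ['.','4','8','0'] ['0','.','4','8'] u) = pvScan pvE2 u := by
  refine pvLgen _ _ pvE3 (fun _ => True)
    (by simp) (by decide) (by decide) (by decide) (by decide)
    (fun _ _ _ _ => trivial) ?_ u.length u le_rfl trivial
  intro c cs _ hkp p hp hpre
  fin_cases hp
  · exact pvNCcons (by simp) _ _ (by decide) hpre
  · exact pvNCcons (by simp) _ _ (by decide) hpre
  · exact pvNCcons (by simp) _ _ (by decide) hpre

theorem pvL4 (u : List Char) :
    pvScan pvE4 (pvRepl ['E','s','t','r','e','l','l','a'] ['Y'] u) = pvScan pvE3 u := by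
  refine pvLgen _ _ pvE4 (fun _ => True)
    (by simp) (by decide) (by decide) (by decide) (by decide)
    (fun _ _ _ _ => trivial) ?_ u.length u le_rfl trivial
  intro c cs _ hkp p hp hpre
  fin_cases hp
  · exact pvNCcons (by simp) _ _ (by decide) hpre
  · exact pvNCcons (by simp) _ _ (by decide) hpre

theorem pvL5 (u : List Char) :
    pvScan pvE5 (pvRepl ['D','e','l','t','a'] ['D'] u) = pvScan pvE4 u := by
  refine pvLgen _ _ pvE5 (fun _ => True)
    (by simp) (by decide) (by decide) (by decide) (by decide)
    (fun _ _ _ _ => trivial) ?_ u.length u le_rfl trivial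
  intro c cs _ hkp p hp hpre
  fin_cases hp
  · exact pvNCcons (by simp) _ _ (by decide) hpre

theorem pvL6 (u : List Char) :
    pvScan [] (pvRepl ['F','a','s','e','_','P','a','r','t','i','d','a'] ['4','D'] u) = pvScan pvE5 u := by
  refine pvLgen _ _ [] (fun _ => True)
    (by simp) (by simp) (by simp) (by simp) (by simp)
    (fun _ _ _ _ => trivial) (fun c cs _ _ p hp => absurd hp (by simp)) u.length u le_rfl trivial

theorem pvA36 (x : List Char) :
    pvRepl ['F','a','s','e','_','P','a','r','t','i','d','a'] ['4','D']
      (pvRepl ['D','e','l','t','a'] ['D']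
        (pvRepl ['E','s','t','r','e','l','l','a'] ['Y']
          (pvRepl ['.','4','8','0'] ['0','.','4','8'] x))) = pvScan pvE2 x := by
  rw [← pvScan_id (pvRepl ['F','a','s','e','_','P','a','r','t','i','d','a'] ['4','D'] _),
    pvL6, pvL5, pvL4, pvL3]

theorem pvMain (u : List Char)
    (h240 : ¬ (['.','4','8','.','2','4','0'] <:+: u))
    (h208 : ¬ (['.','4','8','.','2','0','8'] <:+: u)) :
    pvRepl ['F','a','s','e','_','P','a','r','t','i','d','a'] ['4','D']
      (pvRepl ['D','e','l','t','a'] ['D']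
        (pvRepl ['E','s','t','r','e','l','l','a'] ['Y']
          (pvRepl ['.','4','8','0'] ['0','.','4','8']
            (pvRepl ['.','2','0','8'] ['0','.','2','0','8']
              (pvRepl ['.','2','4','0'] ['0','.','2','4'] u))))) = pvScan pvE0 u := by
  have h208' : ¬ (['.','4','8','.','2','0','8'] <:+:
      pvRepl ['.','2','4','0'] ['0','.','2','4'] u) :=
    pvPres208 u.length u le_rfl h208
  rw [pvA36, pvL2 _ h208', pvL1 u h240 h208]

-- ---- bridging PySem's str.replace to pvRepl, and the ports to the char level ----

theorem pvGo_eq (k v : List Char) (hk : k ≠ []) :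
    ∀ fuel l acc, l.length ≤ fuel →
      PySem.Chars.replace.go k v fuel l acc = acc.reverse ++ pvRepl k v l := by
  intro fuel
  induction fuel with
  | zero =>
    intro l acc hl
    rw [List.length_eq_zero_iff.mp (Nat.le_zero.mp hl)]
    rw [PySem.Chars.replace.go, pvRepl_nil]
  | succ n ih =>
    intro l acc hl
    match l with
    | [] =>
      rw [PySem.Chars.replace.go, pvRepl_nil, List.append_nil]
      omega
    | c :: t =>
      have hkpos : 0 < k.length := List.length_pos_iff.mpr hk
      simp only [List.length_cons] at hl
      rw [PySem.Chars.replace.go]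
      by_cases hp : k.isPrefixOf (c :: t)
      · rw [if_pos hp]
        have hdl : (List.drop k.length (c :: t)).length ≤ n := by
          simp only [List.length_drop, List.length_cons]
          omega
        rw [ih _ _ hdl]
        have hmax : k.length.max 1 = k.length := Nat.max_eq_left hkpos
        rw [pvRepl, if_pos hp, hmax]
        simp
      · rw [if_neg hp]
        have ht : t.length ≤ n := by omega
        rw [ih _ _ ht]
        have hnp : ¬ k <+: (c :: t) := fun hq => hp (List.isPrefixOf_iff_prefix.mpr hq)
        rw [pvRepl_miss _ hnp]
        simp

theorem pvReplace_eq (s k v : List Char) (hk : k ≠ []) :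
    PySem.Chars.replace s k v = pvRepl k v s := by
  rw [PySem.Chars.replace, if_neg (by simpa [List.isEmpty_iff] using hk),
    pvGo_eq k v hk s.length s [] le_rfl]
  simp

theorem pvA_chars (s : String) :
    set_Label_Tx s = String.ofList
      (pvRepl ['F','a','s','e','_','P','a','r','t','i','d','a'] ['4','D']
        (pvRepl ['D','e','l','t','a'] ['D']
          (pvRepl ['E','s','t','r','e','l','l','a'] ['Y']
            (pvRepl ['.','4','8','0'] ['0','.','4','8']
              (pvRepl ['.','2','0','8'] ['0','.','2','0','8']
                (pvRepl ['.','2','4','0'] ['0','.','2','4'] s.toList)))))) := by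
  have hrep : ∀ a b c : String,
      PySem.Str.replace a b c = String.ofList (PySem.Chars.replace a.toList b.toList c.toList) :=
    fun _ _ _ => rfl
  simp only [set_Label_Tx, List.foldl]
  rw [hrep]
  simp only [PySem.Str.toList_replace]
  rw [pvReplace_eq _ _ _ (by decide), pvReplace_eq _ _ _ (by decide),
    pvReplace_eq _ _ _ (by decide), pvReplace_eq _ _ _ (by decide),
    pvReplace_eq _ _ _ (by decide), pvReplace_eq _ _ _ (by decide)]
  rfl

-- ---- tightness: on any input containing ".48.240" or ".48.208" the outputs differ ----

theorem pvBase240 (rest : List Char) :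
    pvScan pvE2 (pvRepl ['.','2','0','8'] ['0','.','2','0','8']
      (pvRepl ['.','2','4','0'] ['0','.','2','4'] (['.','4','8','.','2','4','0'] ++ rest)))
    ≠ pvScan pvE0 (['.','4','8','.','2','4','0'] ++ rest) := by
  have e1 : pvRepl ['.','2','4','0'] ['0','.','2','4'] (['.','4','8','.','2','4','0'] ++ rest)
      = ['.','4','8','0','.','2','4'] ++ pvRepl ['.','2','4','0'] ['0','.','2','4'] rest := by
    rw [show (['.','4','8','.','2','4','0'] : List Char) ++ rest
        = ['.','4','8'] ++ (['.','2','4','0'] ++ rest) from rfl,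
      pvRepl_pass (v := ['0','.','2','4']) (w := ['.','4','8']) (by decide),
      pvRepl_hit _ (by simp)]
    simp
  rw [e1, pvRepl_pass (v := ['0','.','2','0','8']) (w := ['.','4','8','0','.','2','4']) (by decide)]
  have eA : pvScan pvE2 (['.','4','8','0','.','2','4']
        ++ pvRepl ['.','2','0','8'] ['0','.','2','0','8'] (pvRepl ['.','2','4','0'] ['0','.','2','4'] rest))
      = ['0','.','4','8'] ++ pvScan pvE2 (['.','2','4']
        ++ pvRepl ['.','2','0','8'] ['0','.','2','0','8'] (pvRepl ['.','2','4','0'] ['0','.','2','4'] rest)) := by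
    rw [show (['.','4','8','0','.','2','4'] : List Char)
        ++ pvRepl ['.','2','0','8'] ['0','.','2','0','8'] (pvRepl ['.','2','4','0'] ['0','.','2','4'] rest)
        = ['.','4','8','0'] ++ (['.','2','4']
        ++ pvRepl ['.','2','0','8'] ['0','.','2','0','8'] (pvRepl ['.','2','4','0'] ['0','.','2','4'] rest)) from rfl]
    exact pvScan_hit (ks := pvE2) (k := ['.','4','8','0']) ['0','.','4','8'] (ks₁ := []) (ks₂ := pvE3) (by simp [pvE2]) (by simp) (by simp) _
  have eB : pvScan pvE0 (['.','4','8','.','2','4','0'] ++ rest)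
      = '.' :: pvScan pvE0 (['4','8','.','2','4','0'] ++ rest) := by
    rw [show (['.','4','8','.','2','4','0'] : List Char) ++ rest
        = '.' :: (['4','8','.','2','4','0'] ++ rest) from rfl]
    exact pvScan_cons_none (pvTryKeys_none_of (by
      intro p hp
      fin_cases hp <;> exact pvNotPrefixAppend (v := ['.','4','8','.','2','4','0']) (by decide) rest))
  rw [eA, eB]
  simp

theorem pvBase208 (rest : List Char) :
    pvScan pvE2 (pvRepl ['.','2','0','8'] ['0','.','2','0','8']
      (pvRepl ['.','2','4','0'] ['0','.','2','4'] (['.','4','8','.','2','0','8'] ++ rest)))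
    ≠ pvScan pvE0 (['.','4','8','.','2','0','8'] ++ rest) := by
  have e1 : pvRepl ['.','2','4','0'] ['0','.','2','4'] (['.','4','8','.','2','0','8'] ++ rest)
      = ['.','4','8','.','2','0','8'] ++ pvRepl ['.','2','4','0'] ['0','.','2','4'] rest :=
    pvRepl_pass (v := ['0','.','2','4']) (w := ['.','4','8','.','2','0','8']) (by decide) rest
  have e2 : pvRepl ['.','2','0','8'] ['0','.','2','0','8']
        (['.','4','8','.','2','0','8'] ++ pvRepl ['.','2','4','0'] ['0','.','2','4'] rest)
      = ['.','4','8','0','.','2','0','8']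
        ++ pvRepl ['.','2','0','8'] ['0','.','2','0','8'] (pvRepl ['.','2','4','0'] ['0','.','2','4'] rest) := by
    rw [show (['.','4','8','.','2','0','8'] : List Char) ++ pvRepl ['.','2','4','0'] ['0','.','2','4'] rest
        = ['.','4','8'] ++ (['.','2','0','8'] ++ pvRepl ['.','2','4','0'] ['0','.','2','4'] rest) from rfl,
      pvRepl_pass (v := ['0','.','2','0','8']) (w := ['.','4','8']) (by decide),
      pvRepl_hit _ (by simp)]
    simp
  rw [e1, e2]
  have eA : pvScan pvE2 (['.','4','8','0','.','2','0','8']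
        ++ pvRepl ['.','2','0','8'] ['0','.','2','0','8'] (pvRepl ['.','2','4','0'] ['0','.','2','4'] rest))
      = ['0','.','4','8'] ++ pvScan pvE2 (['.','2','0','8']
        ++ pvRepl ['.','2','0','8'] ['0','.','2','0','8'] (pvRepl ['.','2','4','0'] ['0','.','2','4'] rest)) := by
    rw [show (['.','4','8','0','.','2','0','8'] : List Char)
        ++ pvRepl ['.','2','0','8'] ['0','.','2','0','8'] (pvRepl ['.','2','4','0'] ['0','.','2','4'] rest)
        = ['.','4','8','0'] ++ (['.','2','0','8']
        ++ pvRepl ['.','2','0','8'] ['0','.','2','0','8'] (pvRepl ['.','2','4','0'] ['0','.','2','4'] rest)) from rfl]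
    exact pvScan_hit (ks := pvE2) (k := ['.','4','8','0']) ['0','.','4','8'] (ks₁ := []) (ks₂ := pvE3) (by simp [pvE2]) (by simp) (by simp) _
  have eB : pvScan pvE0 (['.','4','8','.','2','0','8'] ++ rest)
      = '.' :: pvScan pvE0 (['4','8','.','2','0','8'] ++ rest) := by
    rw [show (['.','4','8','.','2','0','8'] : List Char) ++ rest
        = '.' :: (['4','8','.','2','0','8'] ++ rest) from rfl]
    exact pvScan_cons_none (pvTryKeys_none_of (by
      intro p hp
      fin_cases hp <;> exact pvNotPrefixAppend (v := ['.','4','8','.','2','0','8']) (by decide) rest))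
  rw [eA, eB]
  simp

theorem pvTight : ∀ n u, u.length ≤ n →
    (['.','4','8','.','2','4','0'] <:+: u ∨ ['.','4','8','.','2','0','8'] <:+: u) →
    pvScan pvE2 (pvRepl ['.','2','0','8'] ['0','.','2','0','8']
      (pvRepl ['.','2','4','0'] ['0','.','2','4'] u)) ≠ pvScan pvE0 u := by
  intro n
  induction n with
  | zero =>
    intro u hu hD
    rw [List.length_eq_zero_iff.mp (Nat.le_zero.mp hu)] at hD
    simp at hD
  | succ n ih =>
    intro u hu hD
    match u with
    | [] => simp at hD
    | c :: cs =>
      simp only [List.length_cons] at hu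
      by_cases hb1 : ['.','4','8','.','2','4','0'] <+: (c :: cs)
      · obtain ⟨rest, hrest⟩ := hb1
        rw [← hrest]
        exact pvBase240 rest
      by_cases hb2 : ['.','4','8','.','2','0','8'] <+: (c :: cs)
      · obtain ⟨rest, hrest⟩ := hb2
        rw [← hrest]
        exact pvBase208 rest
      by_cases h1 : ['.','2','4','0'] <+: (c :: cs)
      · obtain ⟨r, hr⟩ := h1
        rw [← hr] at hD ⊢
        have hlen : r.length ≤ n := by
          have h5 := congrArg List.length hr
          simp at h5
          omega
        have hD' := hD.imp (pvInfSplit _ _ r (by decide)) (pvInfSplit _ _ r (by decide))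
        rw [pvRepl_hit _ (by simp),
          pvRepl_pass (v := ['0','.','2','0','8']) (w := ['0','.','2','4']) (by decide),
          pvScan_pass (ks := pvE2) (w := ['0','.','2','4']) (by decide),
          pvScan_hit (ks := pvE0) (k := ['.','2','4','0']) ['0','.','2','4'] (ks₁ := []) (ks₂ := pvE1) (by simp [pvE0]) (by simp) (by simp) r]
        exact fun heq => ih r hlen hD' (List.append_cancel_left heq)
      by_cases h2 : ['.','2','0','8'] <+: (c :: cs)
      · obtain ⟨r, hr⟩ := h2
        rw [← hr] at hD ⊢
        have hlen : r.length ≤ n := by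
          have h5 := congrArg List.length hr
          simp at h5
          omega
        have hD' := hD.imp (pvInfSplit _ _ r (by decide)) (pvInfSplit _ _ r (by decide))
        rw [pvRepl_pass (v := ['0','.','2','4']) (w := ['.','2','0','8']) (by decide),
          pvRepl_hit _ (by simp),
          pvScan_pass (ks := pvE2) (w := ['0','.','2','0','8']) (by decide),
          pvScan_hit (ks := pvE0) (k := ['.','2','0','8']) ['0','.','2','0','8']
            (ks₁ := [(['.','2','4','0'], ['0','.','2','4'])]) (ks₂ := pvE2)
            (by simp [pvE0, pvE1]) (by decide) (by simp) r]
        exact fun heq => ih r hlen hD' (List.append_cancel_left heq)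
      by_cases h3 : ['.','4','8','0'] <+: (c :: cs)
      · obtain ⟨r, hr⟩ := h3
        rw [← hr] at hD ⊢
        have hlen : r.length ≤ n := by
          have h5 := congrArg List.length hr
          simp at h5
          omega
        have hD' := hD.imp (pvInfSplit _ _ r (by decide)) (pvInfSplit _ _ r (by decide))
        rw [pvRepl_pass (v := ['0','.','2','4']) (w := ['.','4','8','0']) (by decide),
          pvRepl_pass (v := ['0','.','2','0','8']) (w := ['.','4','8','0']) (by decide),
          pvScan_hit (ks := pvE2) (k := ['.','4','8','0']) ['0','.','4','8'] (ks₁ := []) (ks₂ := pvE3) (by simp [pvE2]) (by simp) (by simp) _,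
          pvScan_hit (ks := pvE0) (k := ['.','4','8','0']) ['0','.','4','8']
            (ks₁ := [(['.','2','4','0'], ['0','.','2','4']), (['.','2','0','8'], ['0','.','2','0','8'])])
            (ks₂ := pvE3) (by simp [pvE0, pvE1, pvE2]) (by decide) (by simp) r]
        exact fun heq => ih r hlen hD' (List.append_cancel_left heq)
      by_cases h4 : ['E','s','t','r','e','l','l','a'] <+: (c :: cs)
      · obtain ⟨r, hr⟩ := h4
        rw [← hr] at hD ⊢
        have hlen : r.length ≤ n := by
          have h5 := congrArg List.length hr
          simp at h5
          omega
        have hD' := hD.imp (pvInfSplit _ _ r (by decide)) (pvInfSplit _ _ r (by decide))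
        rw [pvRepl_pass (v := ['0','.','2','4']) (w := ['E','s','t','r','e','l','l','a']) (by decide),
          pvRepl_pass (v := ['0','.','2','0','8']) (w := ['E','s','t','r','e','l','l','a']) (by decide),
          pvScan_hit (ks := pvE2) (k := ['E','s','t','r','e','l','l','a']) ['Y']
            (ks₁ := [(['.','4','8','0'], ['0','.','4','8'])]) (ks₂ := pvE4)
            (by simp [pvE2, pvE3]) (by decide) (by simp) _,
          pvScan_hit (ks := pvE0) (k := ['E','s','t','r','e','l','l','a']) ['Y']
            (ks₁ := [(['.','2','4','0'], ['0','.','2','4']), (['.','2','0','8'], ['0','.','2','0','8']),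
              (['.','4','8','0'], ['0','.','4','8'])])
            (ks₂ := pvE4) (by simp [pvE0, pvE1, pvE2, pvE3]) (by decide) (by simp) r]
        exact fun heq => ih r hlen hD' (List.append_cancel_left heq)
      by_cases h5 : ['D','e','l','t','a'] <+: (c :: cs)
      · obtain ⟨r, hr⟩ := h5
        rw [← hr] at hD ⊢
        have hlen : r.length ≤ n := by
          have h5' := congrArg List.length hr
          simp at h5'
          omega
        have hD' := hD.imp (pvInfSplit _ _ r (by decide)) (pvInfSplit _ _ r (by decide))
        rw [pvRepl_pass (v := ['0','.','2','4']) (w := ['D','e','l','t','a']) (by decide),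
          pvRepl_pass (v := ['0','.','2','0','8']) (w := ['D','e','l','t','a']) (by decide),
          pvScan_hit (ks := pvE2) (k := ['D','e','l','t','a']) ['D']
            (ks₁ := [(['.','4','8','0'], ['0','.','4','8']), (['E','s','t','r','e','l','l','a'], ['Y'])])
            (ks₂ := pvE5) (by simp [pvE2, pvE3, pvE4]) (by decide) (by simp) _,
          pvScan_hit (ks := pvE0) (k := ['D','e','l','t','a']) ['D']
            (ks₁ := [(['.','2','4','0'], ['0','.','2','4']), (['.','2','0','8'], ['0','.','2','0','8']),
              (['.','4','8','0'], ['0','.','4','8']), (['E','s','t','r','e','l','l','a'], ['Y'])])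
            (ks₂ := pvE5) (by simp [pvE0, pvE1, pvE2, pvE3, pvE4]) (by decide) (by simp) r]
        exact fun heq => ih r hlen hD' (List.append_cancel_left heq)
      by_cases h6 : ['F','a','s','e','_','P','a','r','t','i','d','a'] <+: (c :: cs)
      · obtain ⟨r, hr⟩ := h6
        rw [← hr] at hD ⊢
        have hlen : r.length ≤ n := by
          have h5 := congrArg List.length hr
          simp at h5
          omega
        have hD' := hD.imp (pvInfSplit _ _ r (by decide)) (pvInfSplit _ _ r (by decide))
        rw [pvRepl_pass (v := ['0','.','2','4']) (w := ['F','a','s','e','_','P','a','r','t','i','d','a']) (by decide),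
          pvRepl_pass (v := ['0','.','2','0','8']) (w := ['F','a','s','e','_','P','a','r','t','i','d','a']) (by decide),
          pvScan_hit (ks := pvE2) (k := ['F','a','s','e','_','P','a','r','t','i','d','a']) ['4','D']
            (ks₁ := [(['.','4','8','0'], ['0','.','4','8']), (['E','s','t','r','e','l','l','a'], ['Y']),
              (['D','e','l','t','a'], ['D'])])
            (ks₂ := []) (by simp [pvE2, pvE3, pvE4, pvE5]) (by decide) (by simp) _,
          pvScan_hit (ks := pvE0) (k := ['F','a','s','e','_','P','a','r','t','i','d','a']) ['4','D']
            (ks₁ := [(['.','2','4','0'], ['0','.','2','4']), (['.','2','0','8'], ['0','.','2','0','8']),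
              (['.','4','8','0'], ['0','.','4','8']), (['E','s','t','r','e','l','l','a'], ['Y']),
              (['D','e','l','t','a'], ['D'])])
            (ks₂ := []) (by simp [pvE0, pvE1, pvE2, pvE3, pvE4, pvE5]) (by decide) (by simp) r]
        exact fun heq => ih r hlen hD' (List.append_cancel_left heq)
      -- no key and no forbidden pattern at position 0: both sides copy `c`
      have hD' : ['.','4','8','.','2','4','0'] <:+: cs ∨ ['.','4','8','.','2','0','8'] <:+: cs := by
        rcases hD with h | h
        · rcases List.infix_cons_iff.mp h with hp | hi
          · exact absurd hp hb1
          · exact Or.inl hi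
        · rcases List.infix_cons_iff.mp h with hp | hi
          · exact absurd hp hb2
          · exact Or.inr hi
      have hK2miss : ¬ ['.','2','0','8'] <+: (c :: pvRepl ['.','2','4','0'] ['0','.','2','4'] cs) :=
        fun hp => h2 (pvNCcons (by simp) '.' ['2','0','8'] (by decide) hp)
      have hn2 : pvTryKeys pvE2 (c :: pvRepl ['.','2','0','8'] ['0','.','2','0','8']
          (pvRepl ['.','2','4','0'] ['0','.','2','4'] cs)) = none := by
        apply pvTryKeys_none_of
        intro p hp
        fin_cases hp
        · intro hp3
          obtain ⟨hc, h480⟩ := List.cons_prefix_cons.mp hp3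
          subst hc
          have hnf208 : ¬ (['.','4','8','.','2','0','8']
              <+: ('.' :: pvRepl ['.','2','4','0'] ['0','.','2','4'] cs)) := by
            intro hq
            obtain ⟨-, hq'⟩ := List.cons_prefix_cons.mp hq
            exact hb2 (List.cons_prefix_cons.mpr ⟨rfl,
              pvNC ['.','2','4','0'] ['0','.','2','4'] (by simp) ['4','8','.','2','0','8'] (by decide) cs hq'⟩)
          have h480' := pvNC480₂ _ hnf208 h480
          have h480'' := pvNC480₁ cs hb1 h480'
          exact h3 (List.cons_prefix_cons.mpr ⟨rfl, h480''⟩)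
        · exact fun hpre =>
            h4 (pvNCcons (by simp) _ _ (by decide) (pvNCcons (by simp) _ _ (by decide) hpre))
        · exact fun hpre =>
            h5 (pvNCcons (by simp) _ _ (by decide) (pvNCcons (by simp) _ _ (by decide) hpre))
        · exact fun hpre =>
            h6 (pvNCcons (by simp) _ _ (by decide) (pvNCcons (by simp) _ _ (by decide) hpre))
      have hn0 : pvTryKeys pvE0 (c :: cs) = none := by
        apply pvTryKeys_none_of
        intro p hp
        fin_cases hp
        · exact h1
        · exact h2
        · exact h3
        · exact h4
        · exact h5
        · exact h6
      rw [pvRepl_miss _ h1, pvRepl_miss _ hK2miss, pvScan_cons_none hn2, pvScan_cons_none hn0]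
      exact fun heq => ih cs (by omega) hD' (by simpa using heq)

-- ===== VERDICT (by name: the statement is the Claim_ definition above) =====
theorem set_Label_Tx_spec : Claim_unchanged_set_Label_Tx := by
  intro LibType _
  unfold Spec_set_Label_Tx
  intro hD
  have h240 : ¬ (['.','4','8','.','2','4','0'] <:+: LibType.toList) := fun hi =>
    hD (Or.inl ((PySem.Str.isIn_iff_infix _ _).mpr
      (by rw [show (".48.240" : String).toList = ['.','4','8','.','2','4','0'] from by decide]
          exact hi)))
  have h208 : ¬ (['.','4','8','.','2','0','8'] <:+: LibType.toList) := fun hi =>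
    hD (Or.inr ((PySem.Str.isIn_iff_infix _ _).mpr
      (by rw [show (".48.208" : String).toList = ['.','4','8','.','2','0','8'] from by decide]
          exact hi)))
  rw [pvA_chars]
  unfold set_Label_Tx_alt
  rw [pvTable_eq]
  exact congrArg String.ofList (pvMain LibType.toList h240 h208)

theorem set_Label_Tx_changed : Claim_changed_set_Label_Tx := by
  unfold Claim_changed_set_Label_Tx
  refine ⟨by decide, by decide, rfl, ?_, by decide⟩
  simp [set_Label_Tx_alt, pvScan, pvTryKeys, pvTable, pvDiffWitness_set_Label_Tx,
    pvDiffWitnessOut_set_Label_Tx]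

theorem set_Label_Tx_tight : Claim_exact_set_Label_Tx := by
  intro LibType _ hD heq
  have hA := pvA_chars LibType
  rw [pvA36] at hA
  have hB : set_Label_Tx_alt LibType = String.ofList (pvScan pvE0 LibType.toList) := by
    unfold set_Label_Tx_alt
    rw [pvTable_eq]
  rw [hA, hB] at heq
  have hlist := congrArg String.toList heq
  rw [String.toList_ofList, String.toList_ofList] at hlist
  have hD' : (['.','4','8','.','2','4','0'] <:+: LibType.toList) ∨
      (['.','4','8','.','2','0','8'] <:+: LibType.toList) := by
    rcases hD with h | h
    · refine Or.inl ?_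
      have h' := (PySem.Str.isIn_iff_infix _ _).mp h
      rwa [show (".48.240" : String).toList = ['.','4','8','.','2','4','0'] from by decide] at h'
    · refine Or.inr ?_
      have h' := (PySem.Str.isIn_iff_infix _ _).mp h
      rwa [show (".48.208" : String).toList = ['.','4','8','.','2','0','8'] from by decide] at h'
  exact pvTight LibType.toList.length _ le_rfl hD' hlist
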